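-- pv_equiv track=rewrite | github.com/jasmoon/playground | python/algo/rainfall.py | determineWaterHeightsSlow
-- ===== SOURCE A (Python) =====
-- def determineWaterHeightsSlow(heights: list[int], rainFallAmount: int) -> list[int]: # O(rain * len(heights))
--     n = len(heights)
--     water = [0] * n
--     if n == 0 or rainFallAmount <= 0:
--         return water
--
--     peakIdx = heights.index(max(heights))
--     leftRain = rightRain = 0
--     if peakIdx == 0:
--         rightRain = rainFallAmount
--     elif peakIdx == n - 1:
--         leftRain = rainFallAmount
--     else:
--         leftRain = rainFallAmount // 2
--         rightRain = rainFallAmount - leftRain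
--
--     def pourSide(start_idx, step, waterAmount):
--         for _ in range(waterAmount):
--             pos = start_idx
--             while True:
--                 nextPos = pos + step
--                 if not (0 <= nextPos < n):
--                     break
--
--                 if heights[nextPos] + water[nextPos] <= heights[pos] + water[pos]:
--                     pos = nextPos
--                 else:
--                     break
--             if pos <= 0 or pos >= n - 1:
--                 break
--             water[pos] += 1
--
--     if peakIdx > 0:
--         pourSide(peakIdx, -1, leftRain)
--     if peakIdx < n-1:
--         pourSide(peakIdx, 1, rightRain)
--     return water
-- ===== SOURCE B (Python) =====
-- def determineWaterHeightsSlow(heights: list[int], rainFallAmount: int) -> list[int]: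
--     # Maintains one running SURFACE profile (terrain + water) instead of a separate
--     # water array, and deposits whole batches of drops at the resting cell at once
--     # (batch size read off from neighbouring surface differences) instead of
--     # simulating the rain one drop at a time.
--     n = len(heights)
--     if n == 0 or rainFallAmount <= 0:
--         return [0] * n
--     surface = list(heights)
--     peak = heights.index(max(heights))
--     if peak == 0:
--         portions = [(1, rainFallAmount)]
--     elif peak == n - 1:
--         portions = [(-1, rainFallAmount)]
--     else:
--         portions = [(-1, rainFallAmount // 2), (1, rainFallAmount - rainFallAmount // 2)]
--     for direction, todo in portions:
--         while todo > 0: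
--             cur = peak
--             while 0 <= cur + direction < n and surface[cur + direction] <= surface[cur]:
--                 cur += direction
--             if cur <= 0 or cur >= n - 1:
--                 break
--             room = surface[cur + direction] - surface[cur]
--             if cur != peak:
--                 room = min(room, surface[cur - direction] - surface[cur] + 1)
--             batch = min(todo, room)
--             surface[cur] += batch
--             todo -= batch
--     return [surface[i] - heights[i] for i in range(n)]
-- ===== Notes on version B (the rewrite author's own statement) =====
-- stated objective: alternative
-- what changed: Replaces the drop-by-drop simulation over a separate water array by batch filling on a single running surface profile (terrain+water in one list): each round walks once to the resting cell and deposits at once the number of drops that rest there before the path changes (read off from neighbouring surface differences), with the water amounts recovered by a final subtraction pass.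
import Mathlib
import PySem

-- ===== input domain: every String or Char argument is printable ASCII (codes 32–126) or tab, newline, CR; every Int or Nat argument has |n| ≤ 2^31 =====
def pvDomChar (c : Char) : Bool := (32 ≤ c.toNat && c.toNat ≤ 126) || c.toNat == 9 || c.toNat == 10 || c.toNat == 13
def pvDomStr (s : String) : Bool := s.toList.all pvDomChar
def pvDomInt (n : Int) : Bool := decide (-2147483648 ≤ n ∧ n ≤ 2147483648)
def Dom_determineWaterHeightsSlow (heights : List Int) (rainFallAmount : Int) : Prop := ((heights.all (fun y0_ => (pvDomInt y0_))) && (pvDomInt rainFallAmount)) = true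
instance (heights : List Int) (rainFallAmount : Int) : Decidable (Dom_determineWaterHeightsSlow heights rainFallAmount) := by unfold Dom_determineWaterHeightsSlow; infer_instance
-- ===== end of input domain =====

-- B replaces A's drop-by-drop simulation over a separate water array by batch deposits on a
-- single running surface profile (terrain+water in one list), recovering the water amounts by
-- a final subtraction pass; same return value, alternative algorithm.

-- ===== PORT A =====
-- surface height at index i (heights[i] + water[i]); every use site is guarded 0 ≤ i < n,
-- where pyGetD is exact Python indexing
def pvSfc (h w : List Int) (i : Int) : Int :=
  PySem.List.pyGetD h i 0 + PySem.List.pyGetD w i 0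

-- water[i] += m (use sites guarded 0 ≤ i < n, where pySetD is exact Python item assignment)
def pvBump (w : List Int) (i m : Int) : List Int :=
  PySem.List.pySetD w i (PySem.List.pyGetD w i 0 + m)

-- the inner `while True` walk of pourSide; fuel (called with n) only makes the loop total:
-- with step = ±1 the walk moves at most n-1 times, so fuel n is never exhausted
def pvWalkA (h w : List Int) : Nat → Int → Int → Int
  | 0, pos, _ => pos
  | fuel + 1, pos, step =>
    let nextPos := pos + step
    if ¬ (0 ≤ nextPos ∧ nextPos < (h.length : Int)) then pos
    else if pvSfc h w nextPos ≤ pvSfc h w pos then pvWalkA h w fuel nextPos step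
    else pos

-- `for _ in range(waterAmount)` body of pourSide
def pvPourA (h : List Int) (start step : Int) : Nat → List Int → List Int
  | 0, w => w
  | d + 1, w =>
    let pos := pvWalkA h w h.length start step
    if pos ≤ 0 ∨ pos ≥ (h.length : Int) - 1 then w
    else pvPourA h start step d (pvBump w pos 1)

def determineWaterHeightsSlow (heights : List Int) (rainFallAmount : Int) : List Int :=
  let n := heights.length
  let water : List Int := List.replicate n 0
  if n = 0 ∨ rainFallAmount ≤ 0 then water
  else
    let peakIdx : Int :=
      (((PySem.List.index? heights ((PySem.List.max? heights (fun y => y)).getD 0)).getD 0 : Nat) : Int)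
    let lr : Int × Int :=
      if peakIdx = 0 then (0, rainFallAmount)
      else if peakIdx = (n : Int) - 1 then (rainFallAmount, 0)
      else (PySem.Int.floordiv rainFallAmount 2,
            rainFallAmount - PySem.Int.floordiv rainFallAmount 2)
    let w1 := if peakIdx > 0 then pvPourA heights peakIdx (-1) lr.1.toNat water else water
    let w2 := if peakIdx < (n : Int) - 1 then pvPourA heights peakIdx 1 lr.2.toNat w1 else w1
    w2

-- ===== PORT B =====
-- B's inner walk over the surface list (condition-first while loop); gas (called with the
-- list length) only makes the loop total
def pvSurfWalk (surf : List Int) : Nat → Int → Int → Int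
  | 0, cur, _ => cur
  | gas + 1, cur, dir =>
    if 0 ≤ cur + dir ∧ cur + dir < (surf.length : Int) ∧
       PySem.List.pyGetD surf (cur + dir) 0 ≤ PySem.List.pyGetD surf cur 0
    then pvSurfWalk surf gas (cur + dir) dir
    else cur

-- `while todo > 0` of B; the extra fuel (called with todo) only makes the loop total —
-- every batch deposits at least one drop
def pvSurfPour (peak dir : Int) : Nat → Nat → List Int → List Int
  | 0, _, surf => surf
  | gas + 1, todo, surf =>
    if todo = 0 then surf
    else
      let cur := pvSurfWalk surf surf.length peak dir
      if cur ≤ 0 ∨ cur ≥ (surf.length : Int) - 1 then surf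
      else
        let room0 := PySem.List.pyGetD surf (cur + dir) 0 - PySem.List.pyGetD surf cur 0
        let room := if cur ≠ peak
          then min room0 (PySem.List.pyGetD surf (cur - dir) 0 - PySem.List.pyGetD surf cur 0 + 1)
          else room0
        let batch := min ((todo : Nat) : Int) room
        pvSurfPour peak dir gas (todo - batch.toNat)
          (PySem.List.pySetD surf cur (PySem.List.pyGetD surf cur 0 + batch))

def determineWaterHeightsSlow_alt (heights : List Int) (rainFallAmount : Int) : List Int :=
  let n := heights.length
  if n = 0 ∨ rainFallAmount ≤ 0 then List.replicate n 0
  else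
    let surface := heights
    let peak : Int :=
      (((PySem.List.index? heights ((PySem.List.max? heights (fun y => y)).getD 0)).getD 0 : Nat) : Int)
    let portions :=
      if peak = 0 then [((1 : Int), rainFallAmount)]
      else if peak = (n : Int) - 1 then [(-1, rainFallAmount)]
      else [(-1, PySem.Int.floordiv rainFallAmount 2),
            (1, rainFallAmount - PySem.Int.floordiv rainFallAmount 2)]
    let final := portions.foldl (fun surf p => pvSurfPour peak p.1 p.2.toNat p.2.toNat surf) surface
    (PySem.List.pyRange 0 (n : Int) 1).map
      (fun i => PySem.List.pyGetD final i 0 - PySem.List.pyGetD heights i 0)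

-- ===== PRECONDITION & SPEC =====
def Spec_determineWaterHeightsSlow (heights : List Int) (rainFallAmount : Int) (out : List Int) : Prop := out = determineWaterHeightsSlow_alt heights rainFallAmount
instance (heights : List Int) (rainFallAmount : Int) (out : List Int) : Decidable (Spec_determineWaterHeightsSlow heights rainFallAmount out) := by unfold Spec_determineWaterHeightsSlow; infer_instance

-- ===== CLAIM (what is proved, stated in full; the proofs are below) =====
def Claim_equal_determineWaterHeightsSlow : Prop := ∀ (heights : List Int) (rainFallAmount : Int), Dom_determineWaterHeightsSlow heights rainFallAmount → Spec_determineWaterHeightsSlow heights rainFallAmount (determineWaterHeightsSlow heights rainFallAmount)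

-- ===== LEMMAS AND PROOFS =====

-- remaining in-range positions in walking direction s (the walk's true step budget)
def pvSteps (n : Nat) (pos s : Int) : Nat := if s = 1 then n - pos.toNat else pos.toNat + 1

theorem pvBump_length (w : List Int) (i m : Int) : (pvBump w i m).length = w.length := by
  unfold pvBump PySem.List.pySetD PySem.List.pySet?
  cases PySem.List.pyIdx? w.length i with
  | none => simp
  | some k => simp

theorem pvSfc_bump_self (h w : List Int) (r m : Int) (h0 : 0 ≤ r) (h1 : r < (w.length : Int)) :
    pvSfc h (pvBump w r m) r = pvSfc h w r + m := by
  have hr : r = ((r.toNat : Nat) : Int) := (Int.toNat_of_nonneg h0).symm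
  unfold pvSfc pvBump
  rw [hr, PySem.List.pyGetD_pySetD_natCast _ _ _ _ _ (by omega)]
  simp; ring

theorem pvSfc_bump_ne (h w : List Int) (x r m : Int) (hx : 0 ≤ x) (hr : 0 ≤ r)
    (hr1 : r < (w.length : Int)) (hne : x ≠ r) : pvSfc h (pvBump w r m) x = pvSfc h w x := by
  have hrc : r = ((r.toNat : Nat) : Int) := (Int.toNat_of_nonneg hr).symm
  have hxc : x = ((x.toNat : Nat) : Int) := (Int.toNat_of_nonneg hx).symm
  unfold pvSfc pvBump
  rw [hrc, hxc, PySem.List.pyGetD_pySetD_natCast _ _ _ _ _ (by omega)]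
  rw [if_neg (by omega)]

theorem pvSetD_setD (w : List Int) (r : Int) (u v : Int) :
    PySem.List.pySetD (PySem.List.pySetD w r u) r v = PySem.List.pySetD w r v := by
  unfold PySem.List.pySetD PySem.List.pySet?
  cases h : PySem.List.pyIdx? w.length r with
  | none => simp [h]
  | some k =>
    simp only [h, Option.map_some, Option.getD_some, List.length_set]
    simp [List.set_set]

theorem pvBump_getD (w : List Int) (r m : Int) (h0 : 0 ≤ r) (h1 : r < (w.length : Int)) :
    PySem.List.pyGetD (pvBump w r m) r 0 = PySem.List.pyGetD w r 0 + m := by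
  have hr : r = ((r.toNat : Nat) : Int) := (Int.toNat_of_nonneg h0).symm
  unfold pvBump
  rw [hr, PySem.List.pyGetD_pySetD_natCast _ _ _ _ _ (by omega)]
  simp

theorem pvBump_bump (w : List Int) (r a b : Int) (h0 : 0 ≤ r) (h1 : r < (w.length : Int)) :
    pvBump (pvBump w r a) r b = pvBump w r (a + b) := by
  unfold pvBump
  rw [show PySem.List.pyGetD (PySem.List.pySetD w r (PySem.List.pyGetD w r 0 + a)) r 0
        = PySem.List.pyGetD w r 0 + a from pvBump_getD w r a h0 h1]
  rw [show PySem.List.pySetD (PySem.List.pySetD w r (PySem.List.pyGetD w r 0 + a)) r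
        (PySem.List.pyGetD w r 0 + a + b) = _ from pvSetD_setD w r _ _]
  ring_nf

theorem pvIdx_in (w : List Int) (r : Int) (h0 : 0 ≤ r) (h1 : r < (w.length : Int)) :
    PySem.List.pyIdx? w.length r = some r.toNat := by
  simp only [PySem.List.pyIdx?]
  split_ifs
  rfl

theorem pvBump_zero (w : List Int) (r : Int) (h0 : 0 ≤ r) (h1 : r < (w.length : Int)) :
    pvBump w r 0 = w := by
  unfold pvBump
  rw [PySem.List.pyGetD_eq_getElem _ _ h0 (by omega)]
  unfold PySem.List.pySetD PySem.List.pySet?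
  rw [pvIdx_in w r h0 h1]
  simp [List.set_getElem_self]

-- surface list = pointwise pvSfc: the bridge between B's surface profile and A's water array
theorem pvIdx_lt (n : Nat) (i : Int) (k : Nat)
    (h : PySem.List.pyIdx? n i = some k) : k < n := by
  simp only [PySem.List.pyIdx?] at h
  split_ifs at h with h1 h2 h3 <;> simp_all <;> omega

theorem pvZip_length (h w : List Int) (hwl : w.length = h.length) :
    (List.zipWith (· + ·) h w).length = h.length := by
  simp [hwl]

theorem pvSfc_zip (h w : List Int) (hwl : w.length = h.length) (i : Int) :
    PySem.List.pyGetD (List.zipWith (· + ·) h w) i 0 = pvSfc h w i := by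
  unfold pvSfc PySem.List.pyGetD PySem.List.pyGet?
  rw [pvZip_length h w hwl, hwl]
  cases hk : PySem.List.pyIdx? h.length i with
  | none => simp
  | some k =>
    have hkn := pvIdx_lt _ _ _ hk
    have hkw : k < w.length := by omega
    have hkz : k < (List.zipWith (· + ·) h w).length := by
      rw [pvZip_length h w hwl]; exact hkn
    simp only [Option.bind_some, List.getElem?_eq_getElem hkn, List.getElem?_eq_getElem hkw,
      List.getElem?_eq_getElem hkz, Option.getD_some, List.getElem_zipWith]

theorem pvSet_zip (h w : List Int) (hwl : w.length = h.length) (r m : Int)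
    (h0 : 0 ≤ r) (h1 : r < (h.length : Int)) :
    PySem.List.pySetD (List.zipWith (· + ·) h w) r (pvSfc h w r + m)
      = List.zipWith (· + ·) h (pvBump w r m) := by
  have hrw : r < (w.length : Int) := by omega
  rw [PySem.List.pySetD_of_nonneg _ _ h0]
  unfold pvBump
  rw [PySem.List.pySetD_of_nonneg _ _ h0]
  apply List.ext_getElem
  · simp [hwl]
  · intro j hj1 hj2
    have hjh : j < h.length := by simp at hj1; omega
    have hjw : j < w.length := by omega
    rw [List.getElem_set]
    conv_rhs => rw [List.getElem_zipWith, List.getElem_set]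
    by_cases hjr : r.toNat = j
    · rw [if_pos hjr, if_pos hjr]
      subst hjr
      unfold pvSfc
      rw [PySem.List.pyGetD_eq_getElem h _ h0 h1]
      ring
    · rw [if_neg hjr, if_neg hjr, List.getElem_zipWith]

-- B's walk over the surface list is A's walk over terrain + water
theorem pvSurfWalk_eq (h w : List Int) (hwl : w.length = h.length) (fuel : Nat)
    (pos step : Int) :
    pvSurfWalk (List.zipWith (· + ·) h w) fuel pos step = pvWalkA h w fuel pos step := by
  induction fuel generalizing pos with
  | zero => rfl
  | succ f ih =>
    simp only [pvSurfWalk, pvWalkA, pvZip_length h w hwl, pvSfc_zip h w hwl]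
    by_cases h1 : 0 ≤ pos + step <;> by_cases h2 : pos + step < (h.length : Int) <;>
      by_cases h3 : pvSfc h w (pos + step) ≤ pvSfc h w pos <;>
      simp [h1, h2, h3, ih]

-- facts about the walk's resting position
theorem pvWalk_facts (h w : List Int) (s : Int) (hs : s = 1 ∨ s = -1)
    (fuel : Nat) (pos : Int) (hp0 : 0 ≤ pos) (hp1 : pos < (h.length : Int))
    (hf : pvSteps h.length pos s ≤ fuel) :
    0 ≤ pvWalkA h w fuel pos s ∧ pvWalkA h w fuel pos s < (h.length : Int) ∧
    (pvWalkA h w fuel pos s ≠ pos →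
      pvSfc h w (pvWalkA h w fuel pos s) ≤ pvSfc h w (pvWalkA h w fuel pos s - s)) ∧
    (0 ≤ pvWalkA h w fuel pos s + s → pvWalkA h w fuel pos s + s < (h.length : Int) →
      pvSfc h w (pvWalkA h w fuel pos s) < pvSfc h w (pvWalkA h w fuel pos s + s)) := by
  induction fuel generalizing pos with
  | zero =>
    exfalso
    rcases hs with rfl | rfl <;> (simp [pvSteps] at hf; try omega)
  | succ f ih =>
    simp only [pvWalkA]
    by_cases hin : 0 ≤ pos + s ∧ pos + s < (h.length : Int)
    · rw [if_neg (not_not_intro hin)]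
      by_cases hle : pvSfc h w (pos + s) ≤ pvSfc h w pos
      · rw [if_pos hle]
        have hf' : pvSteps h.length (pos + s) s ≤ f := by
          rcases hs with rfl | rfl <;> (simp [pvSteps] at hf ⊢; try omega)
        obtain ⟨ha1, ha2, hb, hc⟩ := ih (pos + s) hin.1 hin.2 hf'
        refine ⟨ha1, ha2, ?_, hc⟩
        intro _
        by_cases hrq : pvWalkA h w f (pos + s) s = pos + s
        · rw [hrq, show pos + s - s = pos by ring]
          exact hle
        · exact hb hrq
      · rw [if_neg hle]
        exact ⟨hp0, hp1, fun hne => absurd rfl hne,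
          fun _ _ => lt_of_not_ge hle⟩
    · rw [if_pos hin]
      exact ⟨hp0, hp1, fun hne => absurd rfl hne, fun hx hy => absurd ⟨hx, hy⟩ hin⟩

-- adding j drops at the resting cell r does not move the resting cell while
-- j stays below both caps
theorem pvWalk_bump (h w : List Int) (hwl : w.length = h.length) (s : Int)
    (hs : s = 1 ∨ s = -1) (r j : Int) (hr0 : 0 ≤ r) (hr1 : r < (h.length : Int))
    (hstop : 0 ≤ r + s → r + s < (h.length : Int) → pvSfc h w r + j < pvSfc h w (r + s))
    (fuel : Nat) (pos : Int) (hp0 : 0 ≤ pos) (hp1 : pos < (h.length : Int))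
    (hf : pvSteps h.length pos s ≤ fuel)
    (hwalk : pvWalkA h w fuel pos s = r)
    (hprev : pos = r ∨ pvSfc h w r + j ≤ pvSfc h w (r - s)) :
    pvWalkA h (pvBump w r j) fuel pos s = r := by
  induction fuel generalizing pos with
  | zero =>
    exfalso
    rcases hs with rfl | rfl <;> (simp [pvSteps] at hf; try omega)
  | succ f ih =>
    have hs0 : s ≠ 0 := by rcases hs with rfl | rfl <;> norm_num
    have hrw : r < (w.length : Int) := by rw [hwl]; exact hr1
    by_cases hpr : pos = r
    · subst hpr
      simp only [pvWalkA]
      by_cases hin : 0 ≤ pos + s ∧ pos + s < (h.length : Int)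
      · rw [if_neg (not_not_intro hin)]
        have hst := hstop hin.1 hin.2
        have e1 : pvSfc h (pvBump w pos j) (pos + s) = pvSfc h w (pos + s) :=
          pvSfc_bump_ne h w (pos + s) pos j hin.1 hr0 hrw (by intro hx; apply hs0; omega)
        have e2 : pvSfc h (pvBump w pos j) pos = pvSfc h w pos + j :=
          pvSfc_bump_self h w pos j hr0 hrw
        rw [if_neg (by rw [e1, e2]; omega)]
      · rw [if_pos hin]
    · simp only [pvWalkA] at hwalk ⊢
      by_cases hin : 0 ≤ pos + s ∧ pos + s < (h.length : Int)
      · rw [if_neg (not_not_intro hin)] at hwalk ⊢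
        by_cases hle : pvSfc h w (pos + s) ≤ pvSfc h w pos
        · rw [if_pos hle] at hwalk
          have hprev' : pvSfc h w r + j ≤ pvSfc h w (r - s) := by
            rcases hprev with hq | hq
            · exact absurd hq hpr
            · exact hq
          have e2 : pvSfc h (pvBump w r j) pos = pvSfc h w pos :=
            pvSfc_bump_ne h w pos r j hp0 hr0 hrw hpr
          have hf' : pvSteps h.length (pos + s) s ≤ f := by
            rcases hs with rfl | rfl <;> (simp [pvSteps] at hf ⊢; try omega)
          have hgoalstep : pvSfc h (pvBump w r j) (pos + s) ≤ pvSfc h (pvBump w r j) pos := by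
            by_cases hps : pos + s = r
            · rw [hps, pvSfc_bump_self h w r j hr0 hrw, e2]
              have : r - s = pos := by omega
              rw [this] at hprev'
              exact hprev'
            · rw [pvSfc_bump_ne h w (pos + s) r j hin.1 hr0 hrw hps, e2]
              exact hle
          rw [if_pos hgoalstep]
          exact ih (pos + s) hin.1 hin.2 hf' hwalk
            (by by_cases hps : pos + s = r
                · exact Or.inl hps
                · exact Or.inr hprev')
        · rw [if_neg hle] at hwalk
          exact absurd hwalk hpr
      · rw [if_pos hin] at hwalk
        exact absurd hwalk hpr

-- one batch of m drops at the resting cell equals m single-drop rounds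
theorem pvPour_batch (h : List Int) (s : Int) (hs : s = 1 ∨ s = -1)
    (start : Int) (hs0 : 0 ≤ start) (hs1 : start < (h.length : Int))
    (w : List Int) (hwl : w.length = h.length) (d : Nat) (j : Nat)
    (hbd0 : 0 < pvWalkA h w h.length start s)
    (hbd1 : pvWalkA h w h.length start s < (h.length : Int) - 1)
    (hj : j ≤ min d (min
      (if pvWalkA h w h.length start s = start then (d : Int)
       else pvSfc h w (pvWalkA h w h.length start s - s) - pvSfc h w (pvWalkA h w h.length start s) + 1).toNat
      (pvSfc h w (pvWalkA h w h.length start s + s) - pvSfc h w (pvWalkA h w h.length start s)).toNat)) :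
    pvPourA h start s d w
      = pvPourA h start s (d - j) (pvBump w (pvWalkA h w h.length start s) (j : Int)) := by
  set R := pvWalkA h w h.length start s with hR
  have hRw : R < (w.length : Int) := by rw [hwl]; omega
  revert hj
  induction j with
  | zero =>
    intro _
    rw [show ((0 : Nat) : Int) = 0 from rfl, pvBump_zero w R (by omega) hRw, Nat.sub_zero]
  | succ j ihj =>
    intro hj
    have hjd : j + 1 ≤ d := le_trans hj (min_le_left _ _)
    have hc1 : j + 1 ≤ (if R = start then (d : Int)
        else pvSfc h w (R - s) - pvSfc h w R + 1).toNat :=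
      le_trans hj (le_trans (min_le_right _ _) (min_le_left _ _))
    have hc2 : j + 1 ≤ (pvSfc h w (R + s) - pvSfc h w R).toNat :=
      le_trans hj (le_trans (min_le_right _ _) (min_le_right _ _))
    rw [ihj (by omega)]
    obtain ⟨e, he⟩ : ∃ e, d - j = e + 1 := ⟨d - j - 1, by omega⟩
    rw [he]
    simp only [pvPourA]
    have hwalkj : pvWalkA h (pvBump w R (j : Int)) h.length start s = R := by
      apply pvWalk_bump h w hwl s hs R (j : Int) (by omega) (by omega) ?_ h.length start hs0 hs1
        ?_ hR.symm ?_
      · intro _ _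
        omega
      · rcases hs with rfl | rfl <;> (simp [pvSteps]; try omega)
      · by_cases hrs : R = start
        · exact Or.inl hrs.symm
        · rw [if_neg hrs] at hc1
          exact Or.inr (by omega)
    rw [hwalkj, if_neg (by omega)]
    rw [pvBump_bump w R (j : Int) 1 (by omega) hRw]
    rw [show (j : Int) + 1 = ((j + 1 : Nat) : Int) by push_cast; ring]
    rw [show e = d - (j + 1) by omega]

theorem pvPourA_length (h : List Int) (start s : Int) (d : Nat) (w : List Int) :
    (pvPourA h start s d w).length = w.length := by
  induction d generalizing w with
  | zero => rfl
  | succ d ih =>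
    simp only [pvPourA]
    split
    · rfl
    · rw [ih, pvBump_length]

-- B's batch pour on the surface list tracks A's drop-by-drop pour on the water array
theorem pvSurfPour_eq (h : List Int) (s : Int) (hs : s = 1 ∨ s = -1)
    (peak : Int) (hp0 : 0 ≤ peak) (hp1 : peak < (h.length : Int)) :
    ∀ (bf d : Nat) (w : List Int), d ≤ bf → w.length = h.length →
      pvSurfPour peak s bf d (List.zipWith (· + ·) h w)
        = List.zipWith (· + ·) h (pvPourA h peak s d w) := by
  intro bf
  induction bf with
  | zero =>
    intro d w hd _
    have : d = 0 := by omega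
    subst this
    rfl
  | succ bf ih =>
    intro d w hd hwl
    simp only [pvSurfPour, pvZip_length h w hwl, pvSfc_zip h w hwl,
      pvSurfWalk_eq h w hwl]
    by_cases hd0 : d = 0
    · subst hd0
      rw [if_pos rfl]
      rfl
    · rw [if_neg hd0]
      set R := pvWalkA h w h.length peak s with hR
      by_cases hb : R ≤ 0 ∨ R ≥ (h.length : Int) - 1
      · rw [if_pos hb]
        obtain ⟨e, rfl⟩ : ∃ e, d = e + 1 := ⟨d - 1, by omega⟩
        simp only [pvPourA]
        rw [← hR, if_pos hb]
      · rw [if_neg hb]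
        have hb1' : 0 < R := by omega
        have hb2 : R < (h.length : Int) - 1 := by omega
        obtain ⟨hf0, hf1, hfb, hfc⟩ := pvWalk_facts h w s hs h.length peak hp0 hp1
          (by rcases hs with rfl | rfl <;> (simp [pvSteps]; try omega))
        rw [← hR] at hf0 hf1 hfb hfc
        have hrin : 0 ≤ R + s ∧ R + s < (h.length : Int) := by
          rcases hs with rfl | rfl <;> constructor <;> omega
        have hroom0 : 0 < pvSfc h w (R + s) - pvSfc h w R := by
          have := hfc hrin.1 hrin.2
          omega
        set room : Int := if R ≠ peak
          then min (pvSfc h w (R + s) - pvSfc h w R)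
                   (pvSfc h w (R - s) - pvSfc h w R + 1)
          else pvSfc h w (R + s) - pvSfc h w R with hroomdef
        set batch : Int := min ((d : Nat) : Int) room with hbatchdef
        have hback : R ≠ peak → 1 ≤ pvSfc h w (R - s) - pvSfc h w R + 1 := by
          intro hrs
          have := hfb hrs
          omega
        have hroom1 : 1 ≤ room := by
          rw [hroomdef]
          by_cases hrs : R ≠ peak
          · rw [if_pos hrs]
            exact le_min (by omega) (hback hrs)
          · rw [if_neg hrs]
            omega
        have hd1 : (1 : Int) ≤ ((d : Nat) : Int) := by
          omega
        have hbatchpos : 0 < batch := by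
          rw [hbatchdef]
          exact lt_min (by omega) (by omega)
        have hb_d : batch ≤ ((d : Nat) : Int) := by
          rw [hbatchdef]
          exact min_le_left _ _
        have hb_room : batch ≤ room := by
          rw [hbatchdef]
          exact min_le_right _ _
        have hb_c2 : batch ≤ pvSfc h w (R + s) - pvSfc h w R := by
          refine le_trans hb_room ?_
          rw [hroomdef]
          by_cases hrs : R ≠ peak
          · rw [if_pos hrs]
            exact min_le_left _ _
          · rw [if_neg hrs]
        have hjle : batch.toNat ≤ min d (min
            (if R = peak then (d : Int)
             else pvSfc h w (R - s) - pvSfc h w R + 1).toNat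
            (pvSfc h w (R + s) - pvSfc h w R).toNat) := by
          refine Nat.le_min.mpr ⟨by omega, Nat.le_min.mpr ⟨?_, by omega⟩⟩
          by_cases hrs : R = peak
          · rw [if_pos hrs]
            omega
          · rw [if_neg hrs]
            have hb_c1 : batch ≤ pvSfc h w (R - s) - pvSfc h w R + 1 := by
              refine le_trans hb_room ?_
              rw [hroomdef, if_pos hrs]
              exact min_le_right _ _
            omega
        have hbatchcast : ((batch.toNat : Nat) : Int) = batch := Int.toNat_of_nonneg (by omega)
        rw [pvSet_zip h w hwl R batch (by omega) (by omega)]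
        rw [pvPour_batch h s hs peak hp0 hp1 w hwl d batch.toNat hb1' hb2 hjle, ← hR,
          hbatchcast]
        exact ih (d - batch.toNat) (pvBump w R batch)
          (by omega) (by rw [pvBump_length, hwl])

-- zipWith (+) over an all-zero water array is the terrain itself
theorem pvZip_replicate (h : List Int) :
    List.zipWith (· + ·) h (List.replicate h.length 0) = h := by
  induction h with
  | nil => rfl
  | cons x t ih => simp only [List.length_cons, List.replicate_succ, List.zipWith_cons_cons,
      Int.add_zero, ih]

-- the final comprehension [surface[i] - heights[i] for i in range(n)] recovers the water array
theorem pvMap_sub (h w : List Int) (hwl : w.length = h.length) :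
    (PySem.List.pyRange 0 (h.length : Int) 1).map
        (fun i => PySem.List.pyGetD (List.zipWith (· + ·) h w) i 0
                  - PySem.List.pyGetD h i 0) = w := by
  have hcong : ∀ i ∈ PySem.List.pyRange 0 (h.length : Int) 1,
      PySem.List.pyGetD (List.zipWith (· + ·) h w) i 0 - PySem.List.pyGetD h i 0
        = PySem.List.pyGetD w i 0 := by
    intro i _
    rw [pvSfc_zip h w hwl i]
    unfold pvSfc
    ring
  rw [List.map_congr_left hcong, ← hwl]
  exact PySem.List.map_pyGetD_pyRange_zero' w 0

-- n = 1: the pour is the identity (the single cell is a boundary)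
theorem pvWalkA_zero_singleton (h w : List Int) (hn : h.length = 1) (fuel : Nat) (s : Int) :
    pvWalkA h w fuel 0 s = 0 := by
  have hlen : (h.length : Int) = 1 := by rw [hn]; rfl
  induction fuel with
  | zero => rfl
  | succ f ih =>
    simp only [pvWalkA]
    by_cases hs : s = 0
    · subst hs
      simp only [Int.add_zero, ih]
      split_ifs <;> rfl
    · rw [if_pos (by rw [hlen]; omega)]

theorem pvPourA_singleton (h : List Int) (hn : h.length = 1) (s : Int) (d : Nat)
    (w : List Int) : pvPourA h 0 s d w = w := by
  cases d with
  | zero => rfl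
  | succ e =>
    simp only [pvPourA, pvWalkA_zero_singleton h w hn]
    rw [if_pos (Or.inl le_rfl)]

-- ===== VERDICT (by name: the statement is the Claim_ definition above) =====
theorem determineWaterHeightsSlow_spec : Claim_equal_determineWaterHeightsSlow := by
  intro heights rain _
  unfold Spec_determineWaterHeightsSlow
  simp only [determineWaterHeightsSlow, determineWaterHeightsSlow_alt]
  by_cases h0 : heights.length = 0 ∨ rain ≤ 0
  · rw [if_pos h0, if_pos h0]
  · rw [if_neg h0, if_neg h0]
    set P : Int := (((PySem.List.index? heights
      ((PySem.List.max? heights (fun y => y)).getD 0)).getD 0 : Nat) : Int) with hPdef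
    have hP0 : 0 ≤ P := by rw [hPdef]; exact Int.natCast_nonneg _
    have hne : heights ≠ [] := by
      intro hx
      exact h0 (Or.inl (by rw [hx]; rfl))
    have hPlt : P < (heights.length : Int) := by
      obtain ⟨x, t, hxt⟩ : ∃ x t, heights = x :: t := by
        cases heights with
        | nil => exact absurd rfl hne
        | cons x t => exact ⟨x, t, rfl⟩
      cases hm : PySem.List.max? heights (fun y => y) with
      | none =>
        rw [hxt, PySem.List.max?_id_cons] at hm
        simp at hm
      | some mx =>
        have hmem : mx ∈ heights := PySem.List.max?_mem hm
        have hsome : (PySem.List.index? heights mx).isSome :=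
          (PySem.List.index?_isSome_iff heights mx).mpr hmem
        cases hidx : PySem.List.index? heights mx with
        | none => rw [hidx] at hsome; simp at hsome
        | some k =>
          obtain ⟨hk, -, -⟩ := PySem.List.getElem_of_index?_eq_some hidx
          rw [hPdef, hm]
          simp only [Option.getD_some]
          rw [hidx]
          simp only [Option.getD_some]
          exact_mod_cast hk
    have hrz : heights = List.zipWith (· + ·) heights (List.replicate heights.length 0) :=
      (pvZip_replicate heights).symm
    have hwlen : (List.replicate heights.length (0 : Int)).length = heights.length := by simp
    have hlr1 : (if P = 0 then ((0 : Int), rain)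
        else if P = (heights.length : Int) - 1 then (rain, (0 : Int))
        else (PySem.Int.floordiv rain 2, rain - PySem.Int.floordiv rain 2)).1
        = (if P = 0 then (0 : Int) else if P = (heights.length : Int) - 1 then rain
           else PySem.Int.floordiv rain 2) := by
      by_cases hp0 : P = 0
      · rw [if_pos hp0, if_pos hp0]
      · rw [if_neg hp0, if_neg hp0]
        by_cases hpn : P = (heights.length : Int) - 1
        · rw [if_pos hpn, if_pos hpn]
        · rw [if_neg hpn, if_neg hpn]
    have hlr2 : (if P = 0 then ((0 : Int), rain)
        else if P = (heights.length : Int) - 1 then (rain, (0 : Int))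
        else (PySem.Int.floordiv rain 2, rain - PySem.Int.floordiv rain 2)).2
        = rain - (if P = 0 then (0 : Int) else if P = (heights.length : Int) - 1 then rain
           else PySem.Int.floordiv rain 2) := by
      by_cases hp0 : P = 0
      · rw [if_pos hp0, if_pos hp0]
        simp
      · rw [if_neg hp0, if_neg hp0]
        by_cases hpn : P = (heights.length : Int) - 1
        · rw [if_pos hpn, if_pos hpn]
          simp
        · rw [if_neg hpn, if_neg hpn]
    rw [hlr1, hlr2]
    set L : Int := (if P = 0 then (0 : Int) else if P = (heights.length : Int) - 1 then rain
      else PySem.Int.floordiv rain 2) with hL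
    by_cases hpeak0 : P = 0
    · have hLz : L = 0 := by rw [hL, if_pos hpeak0]
      rw [if_pos hpeak0]
      simp only [List.foldl_cons, List.foldl_nil]
      by_cases hn1 : P < (heights.length : Int) - 1
      · rw [if_pos hn1, if_neg (show ¬ P > 0 by omega), hLz]
        have hB1 : pvSurfPour P 1 rain.toNat rain.toNat heights
            = List.zipWith (· + ·) heights
                (pvPourA heights P 1 rain.toNat (List.replicate heights.length 0)) := by
          conv_lhs => rw [hrz]
          exact pvSurfPour_eq heights 1 (Or.inl rfl) P hP0 hPlt rain.toNat rain.toNat _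
            le_rfl hwlen
        rw [hB1, pvMap_sub heights _ (by rw [pvPourA_length]; simp), sub_zero]
      · rw [if_neg hn1, if_neg (show ¬ P > 0 by omega)]
        have hn1' : heights.length = 1 := by omega
        have hB1 : pvSurfPour P 1 rain.toNat rain.toNat heights
            = List.zipWith (· + ·) heights (List.replicate heights.length 0) := by
          conv_lhs => rw [hrz]
          rw [pvSurfPour_eq heights 1 (Or.inl rfl) P hP0 hPlt rain.toNat rain.toNat _
            le_rfl hwlen, hpeak0, pvPourA_singleton heights hn1' 1 rain.toNat]
        rw [hB1, pvMap_sub heights _ hwlen]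
    · by_cases hpeakn : P = (heights.length : Int) - 1
      · have hLr : L = rain := by rw [hL, if_neg hpeak0, if_pos hpeakn]
        rw [if_neg hpeak0, if_pos hpeakn]
        simp only [List.foldl_cons, List.foldl_nil]
        rw [if_neg (show ¬ P < (heights.length : Int) - 1 by omega),
          if_pos (show P > 0 by omega), hLr]
        have hB1 : pvSurfPour P (-1) rain.toNat rain.toNat heights
            = List.zipWith (· + ·) heights
                (pvPourA heights P (-1) rain.toNat (List.replicate heights.length 0)) := by
          conv_lhs => rw [hrz]
          exact pvSurfPour_eq heights (-1) (Or.inr rfl) P hP0 hPlt rain.toNat rain.toNat _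
            le_rfl hwlen
        rw [hB1, pvMap_sub heights _ (by rw [pvPourA_length]; simp)]
      · have hLq : L = PySem.Int.floordiv rain 2 := by rw [hL, if_neg hpeak0, if_neg hpeakn]
        rw [if_neg hpeak0, if_neg hpeakn]
        simp only [List.foldl_cons, List.foldl_nil]
        rw [if_pos (show P < (heights.length : Int) - 1 by omega),
          if_pos (show P > 0 by omega), ← hLq]
        have hB1 : pvSurfPour P (-1) L.toNat L.toNat heights
            = List.zipWith (· + ·) heights
                (pvPourA heights P (-1) L.toNat (List.replicate heights.length 0)) := by
          conv_lhs => rw [hrz]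
          exact pvSurfPour_eq heights (-1) (Or.inr rfl) P hP0 hPlt L.toNat L.toNat _
            le_rfl hwlen
        have hB2 : pvSurfPour P 1 (rain - L).toNat (rain - L).toNat
              (List.zipWith (· + ·) heights
                (pvPourA heights P (-1) L.toNat (List.replicate heights.length 0)))
            = List.zipWith (· + ·) heights
                (pvPourA heights P 1 (rain - L).toNat
                  (pvPourA heights P (-1) L.toNat (List.replicate heights.length 0))) :=
          pvSurfPour_eq heights 1 (Or.inl rfl) P hP0 hPlt (rain - L).toNat (rain - L).toNat _
            le_rfl (by rw [pvPourA_length]; simp)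
        rw [hB1, hB2, pvMap_sub heights _ (by rw [pvPourA_length, pvPourA_length]; simp)]
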